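-- pv_equiv track=rewrite | github.com/MisterSynergy/itemstats | main.py | get_ticks
-- ===== SOURCE A (Python) =====
-- BIN_SIZE = 1000000 # int
--
-- TICK_STEP = 10 # int; in million QIDs
--
-- def get_ticks(data1:dict[int, int]) -> list[str]:
--     ticks = []
--     for i in range(0, len(data1)):
--         if (i+1)%TICK_STEP == 0:
--             ticks.append(f'Q{int((i+1)*BIN_SIZE/1000000)}M')
--         else:
--             ticks.append('')
--
--     return ticks
-- ===== SOURCE B (Python) =====
-- BIN_SIZE = 1000000 # int
--
-- TICK_STEP = 10 # int; in million QIDs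
--
-- def get_ticks(data1:dict[int, int]) -> list[str]:
--     n = len(data1)
--     out = []
--     for q in range(1, n // TICK_STEP + 1):
--         out += [''] * (TICK_STEP - 1) + [f'Q{int(q*TICK_STEP*BIN_SIZE/1000000)}M']
--     out += [''] * (n % TICK_STEP)
--     return out
-- ===== Notes on version B (the rewrite author's own statement) =====
-- stated objective: alternative
-- what changed: Replaces A's per-index modulo-test loop by block construction: for each full block of 10 it appends 9 empty strings plus the label computed from the block number, then appends the remainder of empty strings, so no index test is performed at all.
import Mathlib
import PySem

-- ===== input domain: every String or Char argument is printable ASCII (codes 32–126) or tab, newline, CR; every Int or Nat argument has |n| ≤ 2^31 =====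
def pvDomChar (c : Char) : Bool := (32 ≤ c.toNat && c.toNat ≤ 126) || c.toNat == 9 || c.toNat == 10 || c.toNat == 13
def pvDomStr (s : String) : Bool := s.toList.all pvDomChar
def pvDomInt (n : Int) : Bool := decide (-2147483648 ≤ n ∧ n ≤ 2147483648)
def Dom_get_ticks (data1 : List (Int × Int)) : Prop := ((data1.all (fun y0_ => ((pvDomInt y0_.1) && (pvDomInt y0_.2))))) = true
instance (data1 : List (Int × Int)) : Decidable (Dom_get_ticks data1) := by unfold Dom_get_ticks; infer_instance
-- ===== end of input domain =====

-- B replaces A's per-index modulo-test loop by block construction: each full block of 10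
-- contributes 9 empty strings plus one label built from the block number, then the
-- remainder of empties is appended (alternative decomposition, no index test).

-- ===== PORT A =====
-- A: one pass over range(0, len(data1)); f'Q{int((i+1)*BIN_SIZE/1000000)}M' is float true
-- division then int() truncation — ported as PySem.Int.truncdiv, exact since |(i+1)*10^6| < 2^53.
def get_ticks (data1 : List (Int × Int)) : List String :=
  (PySem.List.pyRange 0 (data1.length : Int) 1).foldl
    (fun ticks i =>
      if PySem.Int.mod (i + 1) 10 = 0 then
        ticks ++ ["Q" ++ PySem.Int.toStr (PySem.Int.truncdiv ((i + 1) * 1000000) 1000000) ++ "M"]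
      else
        ticks ++ [""]) []

-- ===== PORT B =====
-- B: for q in range(1, n//10 + 1): out += ['']*9 + [label q]; then out += ['']*(n % 10).
-- int(q*TICK_STEP*BIN_SIZE/1000000) ported as truncdiv, exact for |q*10^7| < 2^53.
def get_ticks_alt (data1 : List (Int × Int)) : List String :=
  (PySem.List.pyRange 1 (PySem.Int.floordiv (data1.length : Int) 10 + 1) 1).foldl
    (fun out q =>
      out ++ (List.replicate 9 "" ++
        ["Q" ++ PySem.Int.toStr (PySem.Int.truncdiv (q * 10 * 1000000) 1000000) ++ "M"]))
    []
  ++ List.replicate (PySem.Int.mod (data1.length : Int) 10).toNat ""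

-- ===== PRECONDITION & SPEC =====
def Spec_get_ticks (data1 : List (Int × Int)) (out : List String) : Prop := out = get_ticks_alt data1
instance (data1 : List (Int × Int)) (out : List String) : Decidable (Spec_get_ticks data1 out) := by unfold Spec_get_ticks; infer_instance

-- ===== CLAIM =====
def Claim_equal_get_ticks : Prop := ∀ (data1 : List (Int × Int)), Dom_get_ticks data1 → Spec_get_ticks data1 (get_ticks data1)

-- ===== LEMMAS AND PROOFS =====

-- A's per-index cell
def pvCell (i : Int) : String :=
  if PySem.Int.mod (i + 1) 10 = 0 then
    "Q" ++ PySem.Int.toStr (PySem.Int.truncdiv ((i + 1) * 1000000) 1000000) ++ "M"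
  else ""

-- B's per-block chunk
def pvBlk (q : Int) : List String :=
  List.replicate 9 "" ++
    ["Q" ++ PySem.Int.toStr (PySem.Int.truncdiv (q * 10 * 1000000) 1000000) ++ "M"]

-- one full block of A's output
theorem pv_block (m : Nat) :
    (PySem.List.pyRange (10 * m) (10 * m + 10) 1).map pvCell = pvBlk (m + 1) := by
  rw [PySem.List.pyRange_one]
  have h10 : ((10 * (m : Int) + 10) - 10 * m).toNat = 10 := by omega
  rw [h10, show List.range 10 = [0,1,2,3,4,5,6,7,8,9] from by decide]
  simp only [List.map_cons, List.map_nil, pvCell, pvBlk, PySem.Int.mod, Int.fmod_eq_emod,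
    List.replicate, List.cons.injEq, List.cons_append, List.nil_append,
    and_true]
  norm_num
  refine ⟨fun h => absurd h (by omega), fun h => absurd h (by omega), fun h => absurd h (by omega),
    fun h => absurd h (by omega), fun h => absurd h (by omega), fun h => absurd h (by omega),
    fun h => absurd h (by omega), fun h => absurd h (by omega), ?_⟩
  rw [if_pos (show (10 : Int) ∣ 10 * (m : Int) + 9 + 1 from by omega),
    show (10 * (m : Int) + 9 + 1) * 1000000 = ((m : Int) + 1) * 10 * 1000000 from by ring]

-- the remainder r < 10 of A's output is all-empty
theorem pv_rem (m r : Nat) (hr : r < 9 + 1) :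
    (PySem.List.pyRange (10 * m) (10 * m + r) 1).map pvCell = List.replicate r "" := by
  induction r with
  | zero => simp [PySem.List.pyRange_one_eq_nil]
  | succ r ih =>
    rw [show (10 * (m : Int) + (r + 1 : Nat)) = (10 * (m : Int) + r) + 1 from by push_cast; omega,
      PySem.List.pyRange_one_succ_right (by omega)]
    rw [List.map_append, ih (by omega)]
    have hc : pvCell (10 * (m : Int) + r) = "" := by
      unfold pvCell
      rw [if_neg]
      simp only [PySem.Int.mod, Int.fmod_eq_emod]
      norm_num
      omega
    simp [hc, List.replicate_succ']

-- full blocks of A's output = flatMap of B's chunks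
theorem pv_blocks (m : Nat) :
    (PySem.List.pyRange 0 (10 * m) 1).map pvCell =
      (PySem.List.pyRange 1 ((m : Int) + 1) 1).flatMap pvBlk := by
  induction m with
  | zero => simp [PySem.List.pyRange_one_eq_nil]
  | succ m ih =>
    rw [show ((m + 1 : Nat) : Int) = (m : Int) + 1 from by push_cast; ring,
      show (10 : Int) * ((m : Int) + 1) = 10 * m + 10 from by ring,
      PySem.List.pyRange_one_append 0 (10 * m) (10 * m + 10) (by omega) (by omega),
      List.map_append, ih, pv_block m,
      PySem.List.pyRange_one_succ_right (show (1 : Int) ≤ (m : Int) + 1 from by omega)]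
    simp

theorem pv_ab_eq (data1 : List (Int × Int)) : get_ticks data1 = get_ticks_alt data1 := by
  unfold get_ticks get_ticks_alt
  rw [show (fun (ticks : List String) (i : Int) =>
      if PySem.Int.mod (i + 1) 10 = 0 then
        ticks ++ ["Q" ++ PySem.Int.toStr (PySem.Int.truncdiv ((i + 1) * 1000000) 1000000) ++ "M"]
      else ticks ++ [""]) = fun ticks i => ticks ++ [pvCell i] from by
    funext ticks i; unfold pvCell; split <;> rfl]
  rw [PySem.List.foldl_append_singleton_eq_map, PySem.List.foldl_append_eq_flatMap,
    List.nil_append, List.nil_append]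
  set n := data1.length with hn
  have hq : PySem.Int.floordiv (n : Int) 10 = ((n / 10 : Nat) : Int) := by
    unfold PySem.Int.floordiv
    rw [Int.fdiv_eq_ediv, if_pos (Or.inl (by norm_num))]
    omega
  have hm : PySem.Int.mod (n : Int) 10 = ((n % 10 : Nat) : Int) := by
    unfold PySem.Int.mod
    rw [Int.fmod_eq_emod, if_pos (Or.inl (by norm_num))]
    omega
  rw [hq, hm,
    show PySem.List.pyRange 0 (n : Int) 1 =
      PySem.List.pyRange 0 (10 * (n / 10 : Nat)) 1 ++
        PySem.List.pyRange (10 * (n / 10 : Nat)) (10 * (n / 10 : Nat) + (n % 10 : Nat)) 1 from by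
      rw [← PySem.List.pyRange_one_append 0 (10 * (n / 10 : Nat))
        (10 * (n / 10 : Nat) + (n % 10 : Nat)) (by omega) (by omega)]
      congr 1
      omega,
    List.map_append, pv_blocks (n / 10), pv_rem (n / 10) (n % 10) (by omega)]
  simp only [Int.toNat_natCast]
  rfl

-- ===== VERDICT =====
theorem get_ticks_spec : Claim_equal_get_ticks := by
  intro data1 _
  unfold Spec_get_ticks
  exact pv_ab_eq data1
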